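-- pv_equiv track=rewrite | github.com/CyberKatze/similar_document_finder | lcs.py | dist_finder
-- ===== SOURCE A (Python) =====
-- def dist_finder(text, words):
--     counter = 0
--     dist_list = []
--     for i, word in enumerate(text):
--         if len(words) == counter:
--             break
--         if words[counter] == word:
--             dist_list.append(i)
--             counter += 1
--     return dist_list
-- ===== SOURCE B (Python) =====
-- def dist_finder(text, words):
--     # Index the text once: word -> sorted list of its positions; then for each
--     # word binary-search the first position after the previous match.
--     pos = {}
--     for i, w in enumerate(text):
--         pos.setdefault(w, []).append(i)
--     dist_list = []
--     prev = -1
--     for word in words: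
--         lst = pos.get(word, [])
--         lo, hi = 0, len(lst)
--         while lo < hi:
--             mid = (lo + hi) // 2
--             if lst[mid] <= prev:
--                 lo = mid + 1
--             else:
--                 hi = mid
--         if lo == len(lst):
--             break
--         prev = lst[lo]
--         dist_list.append(prev)
--     return dist_list
-- ===== Notes on version B (the rewrite author's own statement) =====
-- stated objective: alternative
-- what changed: B replaces A's single merged scan (one pass over enumerate(text) with an integer counter into words) by a two-stage algorithm: a preprocessing pass builds a word->sorted-positions index dict, then each word is resolved by a hand-rolled binary search for the first position after the previous match; per-word work becomes O(log n) after the O(n) indexing.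
import Mathlib
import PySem

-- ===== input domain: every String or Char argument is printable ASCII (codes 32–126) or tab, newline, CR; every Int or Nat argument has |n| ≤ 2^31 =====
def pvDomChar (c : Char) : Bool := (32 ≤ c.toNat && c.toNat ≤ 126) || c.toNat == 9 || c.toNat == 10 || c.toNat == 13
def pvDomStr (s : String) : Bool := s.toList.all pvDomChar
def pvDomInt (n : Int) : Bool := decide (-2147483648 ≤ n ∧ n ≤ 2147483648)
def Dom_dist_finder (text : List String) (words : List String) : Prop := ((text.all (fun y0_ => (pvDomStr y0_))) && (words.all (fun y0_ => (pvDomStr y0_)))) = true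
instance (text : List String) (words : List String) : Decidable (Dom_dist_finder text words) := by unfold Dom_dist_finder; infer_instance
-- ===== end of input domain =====

-- B replaces A's single merged scan by an index phase (word -> sorted positions dict) plus a
-- hand-rolled binary search per word for the first position after the previous match;
-- return values are proved equal on all inputs (A is total).

-- ===== PORT A =====
-- loop over enumerate(text) with an integer counter into words; `break` = return accumulator
def distFinderLoopA (words : List String) : List (Int × String) → Int → List Int → List Int
  | [], _, dist_list => dist_list
  | (i, word) :: rest, counter, dist_list =>
    if (words.length : Int) == counter then dist_list            -- break
    else match PySem.List.pyGet? words counter with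
      | none => dist_list                                        -- unreachable (counter stays in range)
      | some wc =>
        if wc == word then distFinderLoopA words rest (counter + 1) (dist_list ++ [i])
        else distFinderLoopA words rest counter dist_list

def dist_finder (text : List String) (words : List String) : List Int :=
  distFinderLoopA words (PySem.List.enumerate text) 0 []

-- ===== PORT B =====
-- pass 1: pos = {}; for i, w in enumerate(text): pos.setdefault(w, []).append(i)
def distFinderBuildPos (pairs : List (Int × String)) : PySem.Dict String (List Int) :=
  pairs.foldl (fun d p => d.modify p.2 [] (fun l => l ++ [p.1])) PySem.Dict.empty

-- the hand-written while-loop binary search of Source B (lo, hi are Python non-negative ints)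
def distFinderBsearch (lst : List Int) (prev : Int) (lo hi : Nat) : Nat :=
  if _h : lo < hi then
    let mid := (lo + hi) / 2
    match PySem.List.pyGet? lst (mid : Int) with
    | none => lo                      -- unreachable: mid < hi ≤ lst.length at every call
    | some v => if v ≤ prev then distFinderBsearch lst prev (mid + 1) hi
                else distFinderBsearch lst prev lo mid
  else lo
termination_by hi - lo
decreasing_by all_goals omega

-- pass 2: for word in words: binary-search pos.get(word, []) for the first index > prev
def distFinderLoopAlt (pos : PySem.Dict String (List Int)) : List String → Int → List Int → List Int
  | [], _, dist_list => dist_list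
  | word :: ws, prev, dist_list =>
    let lst := pos.getD word []
    let lo := distFinderBsearch lst prev 0 lst.length
    if lo == lst.length then dist_list                            -- break
    else match PySem.List.pyGet? lst (lo : Int) with
      | none => dist_list                                         -- unreachable: lo < lst.length here
      | some v => distFinderLoopAlt pos ws v (dist_list ++ [v])

def dist_finder_alt (text : List String) (words : List String) : List Int :=
  distFinderLoopAlt (distFinderBuildPos (PySem.List.enumerate text)) words (-1) []

-- ===== PRECONDITION & SPEC =====
def Spec_dist_finder (text : List String) (words : List String) (out : List Int) : Prop := out = dist_finder_alt text words
instance (text : List String) (words : List String) (out : List Int) : Decidable (Spec_dist_finder text words out) := by unfold Spec_dist_finder; infer_instance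

-- ===== CLAIM (what is proved, stated in full; the proofs are below) =====
def Claim_equal_dist_finder : Prop := ∀ (text : List String) (words : List String), Dom_dist_finder text words → Spec_dist_finder text words (dist_finder text words)

-- ===== LEMMAS AND PROOFS =====

-- Reference function: greedy subsequence match of words in text, indices from n.
def greedyG : List String → Nat → List String → List Int
  | [], _, _ => []
  | _ :: _, _, [] => []
  | w :: ws, n, s :: l => if s == w then (n : Int) :: greedyG ws (n + 1) l else greedyG (w :: ws) (n + 1) l
termination_by _ _ l => l.length

-- first index ≥ n (within l, offset n) whose word equals w
def ffIdx (n : Nat) (l : List String) (w : String) : Option Nat :=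
  match l with
  | [] => none
  | s :: l => if s == w then some n else ffIdx (n + 1) l w

-- occurrence indices of w in l, offset n
def occF (n : Nat) (l : List String) (w : String) : List Int :=
  ((PySem.List.enumerate l (n : Int)).filter (fun p => p.2 == w)).map (fun p => p.1)

-- proof helper mirroring A's behaviour: greedy scan consuming an explicit iterator
def distFinderScanB (word : String) : List (Int × String) → Option (Int × List (Int × String))
  | [] => none
  | (i, w) :: rest => if w == word then some (i, rest) else distFinderScanB word rest

def distFinderLoopB : List String → List (Int × String) → List Int
  | [], _ => []
  | word :: ws, it =>
    match distFinderScanB word it with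
    | none => distFinderLoopB ws []
    | some (i, rest) => i :: distFinderLoopB ws rest

lemma distFinderLoopB_nil (ws : List String) : distFinderLoopB ws [] = [] := by
  induction ws with
  | nil => rfl
  | cons w ws ih => simp [distFinderLoopB, distFinderScanB, ih]

lemma distFinder_key (words : List String) (pairs : List (Int × String)) :
    ∀ (c : Nat) (acc : List Int),
      distFinderLoopA words pairs (c : Int) acc = acc ++ distFinderLoopB (words.drop c) pairs := by
  induction pairs with
  | nil => intro c acc; simp [distFinderLoopA, distFinderLoopB_nil]
  | cons p rest ih =>
    intro c acc
    obtain ⟨i, w⟩ := p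
    by_cases hc : c < words.length
    · have hne : ((words.length : Int) == (c : Int)) = false := by
        simp; omega
      have hget : PySem.List.pyGet? words (c : Int) = some words[c] := by
        rw [PySem.List.pyGet?_natCast]
        simp [hc]
      have hdrop : words.drop c = words[c] :: words.drop (c + 1) :=
        List.drop_eq_getElem_cons hc
      rw [distFinderLoopA, hne]
      simp only [hget]
      by_cases hw : words[c] = w
      · have hb : (words[c] == w) = true := by simp [hw]
        have hb' : (w == words[c]) = true := by simp [hw]
        have hcast : ((c : Int) + 1) = ((c + 1 : Nat) : Int) := by push_cast; ring
        rw [if_pos hb, hcast, ih (c + 1) (acc ++ [i]), hdrop]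
        conv_rhs => rw [distFinderLoopB, distFinderScanB, hb']
        simp
      · have hb : (words[c] == w) = false := by simp [hw]
        have hb' : (w == words[c]) = false := by simp [Ne.symm hw]
        rw [if_neg (by simp [hw]), ih c acc, hdrop]
        conv_rhs => rw [distFinderLoopB, distFinderScanB, hb', if_neg Bool.false_ne_true,
          ← distFinderLoopB]
        simp [hw]
    · have hdrop : words.drop c = [] := List.drop_eq_nil_of_le (by omega)
      rw [hdrop]
      by_cases he : c = words.length
      · have : ((words.length : Int) == (c : Int)) = true := by simp [he]
        rw [distFinderLoopA, this]; simp [distFinderLoopB]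
      · have hne : ((words.length : Int) == (c : Int)) = false := by
          simp; omega
        have hget : PySem.List.pyGet? words (c : Int) = none := by
          rw [PySem.List.pyGet?_natCast]
          simp; omega
        rw [distFinderLoopA, hne]
        simp [hget, distFinderLoopB]

-- A-side helper equals the reference greedy
lemma loopB_eq_greedy (l : List String) :
    ∀ (ws : List String) (n : Nat), distFinderLoopB ws (PySem.List.enumerate l (n : Int)) = greedyG ws n l := by
  induction l with
  | nil =>
    intro ws n
    cases ws with
    | nil => simp [distFinderLoopB, greedyG]
    | cons w ws => simp [PySem.List.enumerate_nil, distFinderLoopB_nil, greedyG]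
  | cons s l ih =>
    intro ws n
    cases ws with
    | nil => simp [distFinderLoopB, greedyG]
    | cons w ws =>
      rw [PySem.List.enumerate_cons]
      have hcast : ((n : Int) + 1) = ((n + 1 : Nat) : Int) := by push_cast; ring
      by_cases h : s == w
      · rw [distFinderLoopB, distFinderScanB, h, if_pos rfl]
        simp only []
        rw [hcast, ih ws (n + 1), greedyG, if_pos h]
      · have h' : (s == w) = false := by simpa using h
        rw [distFinderLoopB, distFinderScanB, h', if_neg Bool.false_ne_true, hcast,
          ← distFinderLoopB, ih (w :: ws) (n + 1), greedyG, if_neg (by simp [h'])]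

-- occF structural facts
lemma occF_cons (n : Nat) (s : String) (l : List String) (w : String) :
    occF n (s :: l) w = (if s == w then [(n : Int)] else []) ++ occF (n + 1) l w := by
  have hcast : ((n : Int) + 1) = ((n + 1 : Nat) : Int) := by push_cast; ring
  unfold occF
  rw [PySem.List.enumerate_cons, hcast, List.filter_cons]
  by_cases h : s == w <;> simp [h]

lemma occF_append (n : Nat) (l1 l2 : List String) (w : String) :
    occF n (l1 ++ l2) w = occF n l1 w ++ occF (n + l1.length) l2 w := by
  have hcast : ((n : Int) + (l1.length : Int)) = ((n + l1.length : Nat) : Int) := by push_cast; ring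
  unfold occF
  rw [PySem.List.enumerate_append, hcast, List.filter_append, List.map_append]

lemma occF_bounds (n : Nat) (l : List String) (w : String) :
    ∀ x ∈ occF n l w, (n : Int) ≤ x ∧ x < (n : Int) + l.length := by
  intro x hx
  simp only [occF, List.mem_map, List.mem_filter] at hx
  obtain ⟨p, ⟨hp, _⟩, hfst⟩ := hx
  rw [PySem.List.mem_enumerate_iff] at hp
  obtain ⟨k, hk, rfl⟩ := hp
  subst hfst
  constructor <;> [omega; (push_cast; omega)]

lemma occF_head (l : List String) : ∀ (n : Nat) (w : String),
    (occF n l w).head? = (ffIdx n l w).map (fun i => (i : Int)) := by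
  induction l with
  | nil => intro n w; simp [occF, PySem.List.enumerate_nil, ffIdx]
  | cons s l ih =>
    intro n w
    rw [occF_cons, ffIdx]
    by_cases h : s == w <;> simp [h, ih]

lemma ffIdx_ge (l : List String) : ∀ (n i : Nat) (w : String), ffIdx n l w = some i → n ≤ i := by
  induction l with
  | nil => intro n i w h; simp [ffIdx] at h
  | cons s l ih =>
    intro n i w h
    rw [ffIdx] at h
    by_cases hs : s == w
    · rw [if_pos hs] at h; simp at h; omega
    · rw [if_neg hs] at h; have := ih (n + 1) i w h; omega

-- greedy step through the first matching index
lemma greedy_step (w : String) (ws : List String) (l : List String) : ∀ (n : Nat),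
    greedyG (w :: ws) n l =
      match ffIdx n l w with
      | none => []
      | some i => (i : Int) :: greedyG ws (i + 1) (l.drop (i + 1 - n)) := by
  induction l with
  | nil => intro n; simp [greedyG, ffIdx]
  | cons s l ih =>
    intro n
    by_cases h : s == w
    · have : n + 1 - n = 1 := by omega
      simp [greedyG, ffIdx, h, this]
    · have h' : (s == w) = false := by simpa using h
      rw [greedyG, if_neg (by simp [h']), ih (n + 1), ffIdx, if_neg (by simp [h'])]
      cases hf : ffIdx (n + 1) l w with
      | none => simp
      | some i =>
        have hge := ffIdx_ge l (n + 1) i w hf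
        have h1 : i + 1 - n = (i + 1 - (n + 1)) + 1 := by omega
        simp [h1]

-- the hand-rolled binary search finds the number k of elements ≤ prev
lemma bsearch_step (lst : List Int) (prev : Int) (lo hi : Nat) (h : lo < hi)
    (hlen : hi ≤ lst.length) :
    distFinderBsearch lst prev lo hi =
      if lst[(lo + hi) / 2]'(by omega) ≤ prev then distFinderBsearch lst prev ((lo + hi) / 2 + 1) hi
      else distFinderBsearch lst prev lo ((lo + hi) / 2) := by
  have hmid : (lo + hi) / 2 < lst.length := by omega
  have hget : PySem.List.pyGet? lst (((lo + hi) / 2 : Nat) : Int)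
      = some (lst[(lo + hi) / 2]'hmid) := by
    rw [PySem.List.pyGet?_natCast]; simp [hmid]
  rw [distFinderBsearch, dif_pos h]
  simp only [hget]

lemma bsearch_correct (lst : List Int) (prev : Int) (k : Nat) (_hk : k ≤ lst.length)
    (hiff : ∀ (j : Nat) (h : j < lst.length), (lst[j] ≤ prev ↔ j < k)) :
    ∀ (lo hi : Nat), lo ≤ k → k ≤ hi → hi ≤ lst.length → distFinderBsearch lst prev lo hi = k := by
  suffices H : ∀ (d lo hi : Nat), hi - lo ≤ d → lo ≤ k → k ≤ hi → hi ≤ lst.length →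
      distFinderBsearch lst prev lo hi = k by
    intro lo hi h1 h2 h3; exact H (hi - lo) lo hi le_rfl h1 h2 h3
  intro d
  induction d with
  | zero =>
    intro lo hi hd hlo hhi hlen
    have hnl : ¬ lo < hi := by omega
    rw [distFinderBsearch, dif_neg hnl]; omega
  | succ d ih =>
    intro lo hi hd hlo hhi hlen
    by_cases h : lo < hi
    · have hmid : (lo + hi) / 2 < lst.length := by omega
      rw [bsearch_step lst prev lo hi h hlen]
      by_cases hv : lst[(lo + hi) / 2]'hmid ≤ prev
      · have hmk := (hiff _ hmid).mp hv
        rw [if_pos hv]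
        exact ih _ hi (by omega) (by omega) hhi hlen
      · have hmk : ¬ (lo + hi) / 2 < k := fun hc => hv ((hiff _ hmid).mpr hc)
        rw [if_neg hv]
        exact ih lo _ (by omega) hlo (by omega) (by omega)
    · rw [distFinderBsearch, dif_neg h]; omega

-- the index dict's entry for w is exactly occF 0 text w
lemma buildPos_getD (text : List String) (w : String) :
    (distFinderBuildPos (PySem.List.enumerate text)).getD w [] = occF 0 text w := by
  unfold distFinderBuildPos
  have hmap : (PySem.List.enumerate text).foldl
      (fun d (p : Int × String) => d.modify p.2 [] (fun l => l ++ [p.1])) PySem.Dict.empty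
      = ((PySem.List.enumerate text).map Prod.swap).foldl
        (fun d (p : String × Int) => d.modify p.1 [] (fun l => l ++ [p.2])) PySem.Dict.empty := by
    rw [List.foldl_map]
    congr 1
  rw [hmap, PySem.Dict.getD_foldl_modify_append]
  simp only [occF, List.filter_map, List.map_map]
  rfl

-- B-side loop equals the reference greedy
lemma loopAlt_eq_greedy (text : List String) :
    ∀ (ws : List String) (n : Nat) (acc : List Int), n ≤ text.length →
      distFinderLoopAlt (distFinderBuildPos (PySem.List.enumerate text)) ws ((n : Int) - 1) acc
        = acc ++ greedyG ws n (text.drop n) := by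
  intro ws
  induction ws with
  | nil => intro n acc _; simp [distFinderLoopAlt, greedyG]
  | cons w ws ih =>
    intro n acc hn
    have hsplit : occF 0 text w = occF 0 (text.take n) w ++ occF n (text.drop n) w := by
      have h1 := occF_append 0 (text.take n) (text.drop n) w
      rw [List.take_append_drop] at h1
      rw [h1]; congr 2; simp [List.length_take]; omega
    have hocc : (distFinderBuildPos (PySem.List.enumerate text)).getD w []
        = occF 0 (text.take n) w ++ occF n (text.drop n) w := by
      rw [buildPos_getD, hsplit]
    have hklen : (occF 0 (text.take n) w).length
        ≤ ((distFinderBuildPos (PySem.List.enumerate text)).getD w []).length := by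
      rw [hocc, List.length_append]; omega
    have hiff : ∀ (j : Nat) (h : j < ((distFinderBuildPos (PySem.List.enumerate text)).getD w []).length),
        (((distFinderBuildPos (PySem.List.enumerate text)).getD w [])[j] ≤ (n : Int) - 1
          ↔ j < (occF 0 (text.take n) w).length) := by
      intro j hj
      have hj' : j < (occF 0 (text.take n) w ++ occF n (text.drop n) w).length := by
        rw [← hocc]; exact hj
      have he := List.getElem_of_eq hocc hj
      rw [he]
      by_cases hjk : j < (occF 0 (text.take n) w).length
      · rw [List.getElem_append_left hjk]
        have hb := occF_bounds 0 (text.take n) w _ (List.getElem_mem hjk)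
        have hlen : ((text.take n).length : Int) ≤ (n : Int) := by
          have := List.length_take_le n text
          exact_mod_cast this
        constructor
        · intro _; exact hjk
        · intro _
          obtain ⟨_, h2⟩ := hb
          simp only [Nat.cast_zero, zero_add] at h2
          omega
      · have hj2 : j - (occF 0 (text.take n) w).length < (occF n (text.drop n) w).length := by
          rw [List.length_append] at hj'; omega
        rw [List.getElem_append_right (by omega)]
        have hb := occF_bounds n (text.drop n) w _ (List.getElem_mem hj2)
        constructor
        · intro hle; exfalso; omega
        · intro hc; omega
    have hbs : distFinderBsearch ((distFinderBuildPos (PySem.List.enumerate text)).getD w [])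
        ((n : Int) - 1) 0 ((distFinderBuildPos (PySem.List.enumerate text)).getD w []).length
        = (occF 0 (text.take n) w).length :=
      bsearch_correct _ ((n : Int) - 1) _ hklen hiff 0 _ (by omega) hklen (le_refl _)
    rw [distFinderLoopAlt]
    simp only [hbs]
    rw [greedy_step]
    cases hB : occF n (text.drop n) w with
    | nil =>
      have hke : (occF 0 (text.take n) w).length
          = ((distFinderBuildPos (PySem.List.enumerate text)).getD w []).length := by
        rw [hocc, hB]; simp
      have hff : ffIdx n (text.drop n) w = none := by
        have hh := occF_head (text.drop n) n w
        rw [hB] at hh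
        cases hf : ffIdx n (text.drop n) w with
        | none => rfl
        | some i => rw [hf] at hh; simp at hh
      rw [hff, if_pos (by simp [hke])]
      simp
    | cons i' rest =>
      have hkl : (occF 0 (text.take n) w).length
          < ((distFinderBuildPos (PySem.List.enumerate text)).getD w []).length := by
        rw [hocc, hB, List.length_append]; simp
      rw [if_neg (by simp; omega)]
      have hgetk : PySem.List.pyGet? ((distFinderBuildPos (PySem.List.enumerate text)).getD w [])
          (((occF 0 (text.take n) w).length : Nat) : Int)
          = some (((distFinderBuildPos (PySem.List.enumerate text)).getD w [])[(occF 0 (text.take n) w).length]'hkl) := by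
        rw [PySem.List.pyGet?_natCast]; simp [hkl]
      have he : ((distFinderBuildPos (PySem.List.enumerate text)).getD w [])[(occF 0 (text.take n) w).length]'hkl = i' := by
        have e := List.getElem_of_eq hocc hkl
        rw [e, List.getElem_append_right (le_refl _)]
        simp [hB]
      rw [hgetk]
      obtain ⟨iN, hffN, hiN⟩ : ∃ iN, ffIdx n (text.drop n) w = some iN ∧ (iN : Int) = i' := by
        have hh := occF_head (text.drop n) n w
        rw [hB] at hh
        cases hf : ffIdx n (text.drop n) w with
        | none => rw [hf] at hh; simp at hh
        | some j => rw [hf] at hh; simp at hh; exact ⟨j, rfl, hh.symm⟩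
      have hge := ffIdx_ge (text.drop n) n iN w hffN
      have hlt : iN < text.length := by
        have hb := occF_bounds n (text.drop n) w i' (by rw [hB]; simp)
        rw [← hiN] at hb
        have hdl : ((text.drop n).length : Int) = (text.length : Int) - (n : Int) := by
          rw [List.length_drop]; omega
        rw [hdl] at hb
        omega
      rw [hffN, he]
      have hdd : (text.drop n).drop (iN + 1 - n) = text.drop (iN + 1) := by
        rw [List.drop_drop]; congr 1; omega
      show distFinderLoopAlt (distFinderBuildPos (PySem.List.enumerate text)) ws i' (acc ++ [i'])
          = acc ++ ((iN : Int) :: greedyG ws (iN + 1) ((text.drop n).drop (iN + 1 - n)))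
      have hcast : i' = ((iN + 1 : Nat) : Int) - 1 := by rw [← hiN]; push_cast; ring
      rw [hcast, ih (iN + 1) (acc ++ [((iN + 1 : Nat) : Int) - 1]) (by omega), hdd]
      have hc2 : ((iN + 1 : Nat) : Int) - 1 = (iN : Int) := by push_cast; ring
      rw [hc2]
      simp

-- ===== VERDICT (by name: the statement is the Claim_ definition above) =====
theorem dist_finder_spec : Claim_equal_dist_finder := by
  intro text words _
  unfold Spec_dist_finder dist_finder dist_finder_alt
  have hA : distFinderLoopA words (PySem.List.enumerate text) 0 [] =
      distFinderLoopB words (PySem.List.enumerate text) := by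
    have := distFinder_key words (PySem.List.enumerate text) 0 []
    simpa using this
  have hA2 : distFinderLoopB words (PySem.List.enumerate text) = greedyG words 0 text := by
    have := loopB_eq_greedy text words 0
    simpa using this
  have hB : distFinderLoopAlt (distFinderBuildPos (PySem.List.enumerate text)) words (-1) []
      = greedyG words 0 text := by
    have := loopAlt_eq_greedy text words 0 [] (by omega)
    simpa using this
  rw [hA, hA2, hB]
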